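-- pv_equiv track=rewrite | github.com/minf07l/quantum_visualizer | shor_math.py | recover_period_from_measurement
-- ===== SOURCE A (Python) =====
-- from typing import List, Optional, Tuple
--
-- def continued_fraction_convergents(numerator: int, denominator: int) -> List[Tuple[int, int]]:
--     a = numerator
--     b = denominator
--     quotients = []
--     while b:
--         q = a // b
--         quotients.append(q)
--         a, b = b, a - q * b
--
--     prev_num, num = 0, 1
--     prev_den, den = 1, 0
--     convergents = []
--     for q in quotients:
--         prev_num, num = num, q * num + prev_num
--         prev_den, den = den, q * den + prev_den
--         convergents.append((num, den))
--     return convergents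
--
-- def recover_period_from_measurement(measurement: int, register_size: int, a: int, modulus: int) -> Optional[int]:
--     if measurement == 0:
--         return None
--     for _, denominator in continued_fraction_convergents(measurement, register_size):
--         if denominator == 0:
--             continue
--         for multiplier in range(1, modulus + 1):
--             candidate = denominator * multiplier
--             if pow(a, candidate, modulus) == 1:
--                 return candidate
--     return None
-- ===== SOURCE B (Python) =====
-- def recover_period_from_measurement(measurement, register_size, a, modulus):
--     # The first nonzero convergent denominator of measurement/register_size is
--     # always 1 (whenever register_size != 0), so the continued-fraction search
--     # collapses: the answer is just the multiplicative order of a mod modulus,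
--     # computed here directly by a single running-product scan with no
--     # continued-fraction expansion and no modular exponentiation at all.
--     if measurement == 0 or register_size == 0:
--         return None
--     acc = 1
--     for r in range(1, modulus + 1):
--         acc = acc * a % modulus
--         if acc == 1:
--             return r
--     return None
-- ===== Notes on version B (the rewrite author's own statement) =====
-- stated objective: faster
-- what changed: B drops the continued-fraction machinery entirely: the first nonzero convergent denominator of measurement/register_size is always 1 (whenever register_size is nonzero), so A always returns the multiplicative order of a mod modulus; B computes that order directly with a single running-modular-product scan and no convergents and no modular exponentiation.
import Mathlib
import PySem

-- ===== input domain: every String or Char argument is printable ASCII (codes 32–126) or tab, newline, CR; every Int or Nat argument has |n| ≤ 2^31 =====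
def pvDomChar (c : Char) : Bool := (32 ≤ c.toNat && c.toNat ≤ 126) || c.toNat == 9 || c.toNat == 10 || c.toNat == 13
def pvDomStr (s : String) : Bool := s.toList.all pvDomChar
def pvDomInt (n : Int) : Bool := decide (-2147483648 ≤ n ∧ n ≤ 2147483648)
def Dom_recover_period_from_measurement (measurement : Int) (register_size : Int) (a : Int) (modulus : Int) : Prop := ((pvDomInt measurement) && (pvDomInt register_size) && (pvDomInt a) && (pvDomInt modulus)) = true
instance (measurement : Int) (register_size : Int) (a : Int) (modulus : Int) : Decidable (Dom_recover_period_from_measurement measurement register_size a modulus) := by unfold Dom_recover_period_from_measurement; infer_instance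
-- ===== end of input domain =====

-- B drops the continued-fraction machinery entirely: the first nonzero convergent
-- denominator is always 1 (whenever register_size ≠ 0), so A always returns the
-- multiplicative order of a mod modulus; B computes that order by one running
-- modular-product scan. A timing run reports whether B is measurably faster.

-- termination helper for the continued-fraction while-loop of port A
theorem pv_rem_natAbs_lt (a b : Int) (hb : b ≠ 0) :
    (a - PySem.Int.floordiv a b * b).natAbs < b.natAbs := by
  have h := PySem.Int.floordiv_mul_add_mod a b
  have hm : a - PySem.Int.floordiv a b * b = PySem.Int.mod a b := by linarith
  rw [hm]
  rcases lt_or_gt_of_ne hb with hneg | hpos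
  · have h1 := (PySem.Int.mod_neg_bounds (a := a) hneg).1
    have h2 := (PySem.Int.mod_neg_bounds (a := a) hneg).2
    omega
  · have h1 := PySem.Int.mod_nonneg (a := a) hpos
    have h2 := PySem.Int.mod_lt (a := a) hpos
    omega

-- ===== PORT A =====
-- Python's three-argument pow(a, e, m); exact for e ≥ 0 and m ≥ 1 (the only
-- arguments A's port reaches: modulus ≥ 1, positive candidate).
def pypow3 (a e m : Int) : Int := a ^ e.toNat % m

-- while b: q = a // b; quotients.append(q); a, b = b, a - q * b
def cfQuotients (a b : Int) : List Int :=
  if hb : b = 0 then []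
  else PySem.Int.floordiv a b :: cfQuotients b (a - PySem.Int.floordiv a b * b)
termination_by b.natAbs
decreasing_by exact pv_rem_natAbs_lt a b hb

-- the convergents for-loop of A, a fold over the quotients carrying
-- (prev_num, num, prev_den, den, convergents)
def cfConvergents (numerator denominator : Int) : List (Int × Int) :=
  ((cfQuotients numerator denominator).foldl
    (fun (st : Int × Int × Int × Int × List (Int × Int)) q =>
      (st.2.1, q * st.2.1 + st.1, st.2.2.2.1, q * st.2.2.2.1 + st.2.2.1,
        st.2.2.2.2 ++ [(q * st.2.1 + st.1, q * st.2.2.2.1 + st.2.2.1)]))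
    (0, 1, 1, 0, [])).2.2.2.2

-- inner 'for multiplier in range(1, modulus + 1)' loop of A with its early return
def aInner (a modulus d : Int) : Option Int :=
  (PySem.List.pyRange 1 (modulus + 1) 1).findSome? (fun k =>
    if pypow3 a (d * k) modulus = 1 then some (d * k) else none)

def recover_period_from_measurement (measurement : Int) (register_size : Int) (a : Int) (modulus : Int) : Option Int :=
  if measurement = 0 then none
  else
    (cfConvergents measurement register_size).findSome? (fun p =>
      if p.2 = 0 then none else aInner a modulus p.2)

-- ===== PORT B =====
-- B's order scan: acc = acc * a % modulus; return r as soon as acc == 1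
def bScan (a m : Int) : List Int → Int → Option Int
  | [], _ => none
  | r :: rs, acc =>
    if PySem.Int.mod (acc * a) m = 1 then some r
    else bScan a m rs (PySem.Int.mod (acc * a) m)

def recover_period_from_measurement_alt (measurement : Int) (register_size : Int) (a : Int) (modulus : Int) : Option Int :=
  if measurement = 0 ∨ register_size = 0 then none
  else bScan a modulus (PySem.List.pyRange 1 (modulus + 1) 1) 1

-- ===== PRECONDITION & SPEC =====
def Spec_recover_period_from_measurement (measurement : Int) (register_size : Int) (a : Int) (modulus : Int) (out : Option Int) : Prop := out = recover_period_from_measurement_alt measurement register_size a modulus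
instance (measurement : Int) (register_size : Int) (a : Int) (modulus : Int) (out : Option Int) : Decidable (Spec_recover_period_from_measurement measurement register_size a modulus out) := by unfold Spec_recover_period_from_measurement; infer_instance

-- ===== CLAIM (what is proved, stated in full; the proofs are below) =====
def Claim_equal_recover_period_from_measurement : Prop := ∀ (measurement : Int) (register_size : Int) (a : Int) (modulus : Int), Dom_recover_period_from_measurement measurement register_size a modulus → Spec_recover_period_from_measurement measurement register_size a modulus (recover_period_from_measurement measurement register_size a modulus)

-- ===== LEMMAS AND PROOFS =====

-- recursive form of A's convergents fold
def convRec : List Int → Int → Int → Int → Int → List (Int × Int)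
  | [], _, _, _, _ => []
  | q :: qs, pn, n, pd, d =>
    (q * n + pn, q * d + pd) :: convRec qs n (q * n + pn) d (q * d + pd)

theorem cfConvergents_eq_convRec (numerator denominator : Int) :
    cfConvergents numerator denominator = convRec (cfQuotients numerator denominator) 0 1 1 0 := by
  unfold cfConvergents
  suffices h : ∀ (qs : List Int) (pn n pd d : Int) (acc : List (Int × Int)),
      (qs.foldl
        (fun (st : Int × Int × Int × Int × List (Int × Int)) q =>
          (st.2.1, q * st.2.1 + st.1, st.2.2.2.1, q * st.2.2.2.1 + st.2.2.1,
            st.2.2.2.2 ++ [(q * st.2.1 + st.1, q * st.2.2.2.1 + st.2.2.1)]))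
        (pn, n, pd, d, acc)).2.2.2.2 = acc ++ convRec qs pn n pd d by
    simpa using h (cfQuotients numerator denominator) 0 1 1 0 []
  intro qs
  induction qs with
  | nil => intro pn n pd d acc; simp [convRec]
  | cons q qs ih => intro pn n pd d acc; simp [convRec, List.foldl_cons, ih]

-- recursive form of A's outer loop over the convergents
def aLoop (a modulus : Int) : List Int → Int → Int → Int → Int → Option Int
  | [], _, _, _, _ => none
  | q :: qs, pn, n, pd, d =>
    match (if q * d + pd = 0 then none else aInner a modulus (q * d + pd)) with
    | some c => some c
    | none => aLoop a modulus qs n (q * n + pn) d (q * d + pd)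

theorem findSome?_convRec_eq_aLoop (a modulus : Int) (qs : List Int) :
    ∀ pn n pd d, (convRec qs pn n pd d).findSome?
      (fun p => if p.2 = 0 then none else aInner a modulus p.2) = aLoop a modulus qs pn n pd d := by
  induction qs with
  | nil => intro pn n pd d; simp [convRec, aLoop]
  | cons q qs ih =>
    intro pn n pd d
    simp only [convRec, aLoop, List.findSome?]
    cases h : (if q * d + pd = 0 then none else aInner a modulus (q * d + pd)) with
    | some c => simp [h]
    | none => simpa [h] using ih n (q * n + pn) d (q * d + pd)

-- every quotient of a recursive call (i.e. every quotient after the first) is ≥ 1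
theorem cfQuotients_all_ge1 :
    ∀ (n : Nat) (b : Int), b.natAbs ≤ n → ∀ a : Int, ((0 < b ∧ b < a) ∨ (a < b ∧ b < 0)) →
      ∀ q ∈ cfQuotients a b, 1 ≤ q := by
  intro n
  induction n with
  | zero => intro b hb a hgood; rcases hgood with h | h <;> omega
  | succ k ih =>
    intro b hb a hgood q hq
    have hbne : b ≠ 0 := by rcases hgood with h | h <;> omega
    rw [cfQuotients] at hq
    simp only [hbne, dite_false, List.mem_cons] at hq
    have hrem : a - PySem.Int.floordiv a b * b = PySem.Int.mod a b := by
      have := PySem.Int.floordiv_mul_add_mod a b; linarith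
    rcases hq with hq | hq
    · subst hq
      rcases hgood with ⟨hb0, hba⟩ | ⟨hba, hb0⟩
      · exact (PySem.Int.le_floordiv_iff_mul_le (a := a) (b := b) (q := 1) hb0).mpr (by linarith)
      · have hne : PySem.Int.floordiv a b = PySem.Int.floordiv (-a) (-b) := by
          rw [PySem.Int.floordiv_neg_neg]
        rw [hne]
        exact (PySem.Int.le_floordiv_iff_mul_le (a := -a) (b := -b) (q := 1) (by omega)).mpr
          (by linarith)
    · rw [hrem] at hq
      by_cases hr : PySem.Int.mod a b = 0
      · rw [hr, cfQuotients] at hq; simp at hq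
      · refine ih (PySem.Int.mod a b) ?_ b ?_ q hq
        · have := pv_rem_natAbs_lt a b hbne; rw [hrem] at this; omega
        · rcases lt_or_gt_of_ne hbne with hneg | hpos
          · have h1 := (PySem.Int.mod_neg_bounds (a := a) hneg).1
            have h2 := (PySem.Int.mod_neg_bounds (a := a) hneg).2
            right; omega
          · have h1 := PySem.Int.mod_nonneg (a := a) hpos
            have h2 := PySem.Int.mod_lt (a := a) hpos
            left; omega

-- every quotient after the first one is ≥ 1
theorem cfQuotients_tail_ge1 (a b : Int) : ∀ q ∈ (cfQuotients a b).tail, 1 ≤ q := by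
  by_cases hb : b = 0
  · rw [cfQuotients]; simp [hb]
  · rw [cfQuotients]
    simp only [hb, dite_false, List.tail_cons]
    have hrem : a - PySem.Int.floordiv a b * b = PySem.Int.mod a b := by
      have := PySem.Int.floordiv_mul_add_mod a b; linarith
    rw [hrem]
    by_cases hr : PySem.Int.mod a b = 0
    · rw [hr, cfQuotients]; simp
    · refine cfQuotients_all_ge1 (PySem.Int.mod a b).natAbs _ le_rfl b ?_
      rcases lt_or_gt_of_ne hb with hneg | hpos
      · have h1 := (PySem.Int.mod_neg_bounds (a := a) hneg).1
        have h2 := (PySem.Int.mod_neg_bounds (a := a) hneg).2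
        right; omega
      · have h1 := PySem.Int.mod_nonneg (a := a) hpos
        have h2 := PySem.Int.mod_lt (a := a) hpos
        left; omega

-- with modulus ≤ 0 the multiplier range is empty, so A's loop returns none
theorem aLoop_none_of_nonpos (a m : Int) (hm : m ≤ 0) :
    ∀ (qs : List Int) (pn n pd d : Int), aLoop a m qs pn n pd d = none := by
  intro qs
  induction qs with
  | nil => intro pn n pd d; simp [aLoop]
  | cons q qs ih =>
    intro pn n pd d
    simp only [aLoop]
    have hinner : aInner a m (q * d + pd) = none := by
      unfold aInner
      rw [PySem.List.pyRange_one_eq_nil (by omega)]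
      rfl
    by_cases hz : q * d + pd = 0
    · simp [hz, ih]
    · simp [hz, hinner, ih]

-- A's inner scan at denominator 1 IS B's running-product scan: for modulus ≥ 1
-- the value pow(a, k, m) tested by A equals B's accumulator a^k mod m
theorem inner1_eq (a m : Int) (hm : 1 ≤ m) :
    ∀ (n : Nat) (k0 acc : Int), 1 ≤ k0 → (m + 1 - k0).toNat = n →
      acc % m = a ^ (k0 - 1).toNat % m →
      (PySem.List.pyRange k0 (m + 1) 1).findSome?
        (fun k => if pypow3 a k m = 1 then some k else none)
      = bScan a m (PySem.List.pyRange k0 (m + 1) 1) acc := by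
  intro n
  induction n with
  | zero =>
    intro k0 acc hk0 hn hacc
    rw [PySem.List.pyRange_one_eq_nil (by omega)]
    simp [bScan]
  | succ j ih =>
    intro k0 acc hk0 hn hacc
    have hlt : k0 < m + 1 := by omega
    rw [PySem.List.pyRange_one_cons hlt]
    have hk : k0.toNat = (k0 - 1).toNat + 1 := by omega
    have hstep : PySem.Int.mod (acc * a) m = a ^ k0.toNat % m := by
      rw [PySem.Int.mod_eq_emod_of_pos (by omega), hk, pow_succ, Int.mul_emod, hacc,
        ← Int.mul_emod]
    have hval : pypow3 a k0 m = PySem.Int.mod (acc * a) m := by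
      unfold pypow3; rw [hstep]
    simp only [List.findSome?_cons, bScan]
    by_cases hhit : PySem.Int.mod (acc * a) m = 1
    · simp [hval, hhit]
    · simp only [hval, hhit, if_false]
      refine ih (k0 + 1) (PySem.Int.mod (acc * a) m) (by omega) (by omega) ?_
      rw [hstep]
      have h2 : (k0 + 1 - 1).toNat = k0.toNat := by omega
      rw [h2, Int.emod_emod_of_dvd _ dvd_rfl]

-- if no multiplier works at denominator 1, none works at any denominator e ≥ 1:
-- a^(e*k) ≡ 1 (mod m) forces a to have a multiplicative order r ≤ m, and that r
-- would already have been found at denominator 1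
theorem aInner_one_none_closure (a m : Int) (hm : 1 ≤ m) (h1 : aInner a m 1 = none) :
    ∀ e : Int, 1 ≤ e → aInner a m e = none := by
  intro e he
  unfold aInner at h1 ⊢
  rw [List.findSome?_eq_none_iff] at h1 ⊢
  intro k hk
  rw [PySem.List.mem_pyRange_one] at hk
  by_cases hhit : pypow3 a (e * k) m = 1
  · exfalso
    by_cases hm1 : m = 1
    · unfold pypow3 at hhit
      rw [hm1, Int.emod_one] at hhit
      exact one_ne_zero hhit.symm
    · have hM2 : 2 ≤ m.toNat := by omega
      haveI : NeZero m.toNat := ⟨by omega⟩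
      have hmnat : ((m.toNat : Int)) = m := Int.toNat_of_nonneg (by omega)
      have bridge : ∀ t : Nat, a ^ t % m = 1 ↔ ((a : ZMod m.toNat)) ^ t = 1 := by
        intro t
        have hcast : ((a : ZMod m.toNat)) ^ t = ((a ^ t : Int) : ZMod m.toNat) := by
          push_cast; ring
        have h1m : (1 : Int) % m = 1 := Int.emod_eq_of_lt (by omega) (by omega)
        rw [hcast, show (1 : ZMod m.toNat) = ((1 : Int) : ZMod m.toNat) by simp,
          ZMod.intCast_eq_intCast_iff', hmnat, h1m]
      have hek : 1 ≤ e * k := by nlinarith [hk.1, hk.2]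
      have hx : ((a : ZMod m.toNat)) ^ (e * k).toNat = 1 := by
        unfold pypow3 at hhit
        exact (bridge _).mp hhit
      have hfin : IsOfFinOrder ((a : ZMod m.toNat)) :=
        isOfFinOrder_iff_pow_eq_one.mpr ⟨(e * k).toNat, by omega, hx⟩
      have hr1 : 0 < orderOf ((a : ZMod m.toNat)) := hfin.orderOf_pos
      have hrM : orderOf ((a : ZMod m.toNat)) ≤ m.toNat := by
        have := orderOf_le_card_univ (x := ((a : ZMod m.toNat)))
        rwa [ZMod.card] at this
      have hback : a ^ orderOf ((a : ZMod m.toNat)) % m = 1 :=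
        (bridge _).mpr (pow_orderOf_eq_one _)
      have hmem := h1 ((orderOf ((a : ZMod m.toNat)) : Int))
        (by rw [PySem.List.mem_pyRange_one]; omega)
      have hpos : pypow3 a (1 * (orderOf ((a : ZMod m.toNat)) : Int)) m = 1 := by
        unfold pypow3
        rw [one_mul, Int.toNat_natCast]
        exact hback
      rw [if_pos hpos] at hmem
      simp at hmem
  · simp [hhit]

-- if no multiplier works at denominator 1, A's whole remaining loop returns none
theorem aLoop_none_of_allInner (a m : Int)
    (H : ∀ e, 1 ≤ e → aInner a m e = none) :
    ∀ (qs : List Int), (∀ q ∈ qs, 1 ≤ q) → ∀ pn n pd d, 0 ≤ pd → 1 ≤ d →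
      aLoop a m qs pn n pd d = none := by
  intro qs
  induction qs with
  | nil => intro _ pn n pd d _ _; simp [aLoop]
  | cons q qs ih =>
    intro hqs pn n pd d hpd hd
    have hq : 1 ≤ q := hqs q (List.mem_cons_self ..)
    have hden : 1 ≤ q * d + pd := by nlinarith
    simp only [aLoop]
    rw [if_neg (by omega), H _ hden]
    exact ih (fun x hx => hqs x (List.mem_cons_of_mem _ hx)) n (q * n + pn) d (q * d + pd)
      (by omega) hden

-- ===== VERDICT (by name: the statement is the Claim_ definition above) =====
theorem recover_period_from_measurement_spec : Claim_equal_recover_period_from_measurement := by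
  intro measurement register_size a modulus _hdom
  unfold Spec_recover_period_from_measurement
  unfold recover_period_from_measurement recover_period_from_measurement_alt
  by_cases hz : measurement = 0
  · simp [hz]
  · rw [if_neg hz, cfConvergents_eq_convRec, findSome?_convRec_eq_aLoop]
    by_cases hreg : register_size = 0
    · rw [if_pos (Or.inr hreg), hreg]
      rw [show cfQuotients measurement 0 = [] from by rw [cfQuotients]; simp]
      simp [aLoop]
    · rw [if_neg (by rintro (h | h); exacts [hz h, hreg h])]
      cases hq : cfQuotients measurement register_size with
      | nil => exfalso; rw [cfQuotients] at hq; simp [hreg] at hq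
      | cons q qs =>
        have htail := cfQuotients_tail_ge1 measurement register_size
        rw [hq] at htail
        simp only [List.tail_cons] at htail
        simp only [aLoop, mul_zero, zero_add]
        rw [if_neg one_ne_zero]
        by_cases hm : modulus ≤ 0
        · have hin : aInner a modulus 1 = none := by
            unfold aInner; rw [PySem.List.pyRange_one_eq_nil (by omega)]; rfl
          rw [PySem.List.pyRange_one_eq_nil (by omega)]
          simp [hin, bScan, aLoop_none_of_nonpos a modulus hm]
        · have hbridge : aInner a modulus 1
              = bScan a modulus (PySem.List.pyRange 1 (modulus + 1) 1) 1 := by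
            unfold aInner
            simp only [one_mul]
            exact inner1_eq a modulus (by omega) (modulus + 1 - 1).toNat 1 1 le_rfl rfl (by simp)
          cases hscan : bScan a modulus (PySem.List.pyRange 1 (modulus + 1) 1) 1 with
          | some c => simp [hbridge, hscan]
          | none =>
            have h1 : aInner a modulus 1 = none := hbridge.trans hscan
            simp [hbridge, hscan,
              aLoop_none_of_allInner a modulus
                (aInner_one_none_closure a modulus (by omega) h1)
                qs htail 1 q 0 1 le_rfl le_rfl]
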